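-- pv_equiv track=rewrite | github.com/johntelforduk/advent-of-code-2022 | 20-grove-positioning-system/solution.py | singly_linked_list
-- ===== SOURCE A (Python) =====
-- def singly_linked_list(start: list) -> dict:
--     linked_list, prev = {}, None
--     for i in start:
--         if prev is None:
--             linked_list[i] = start[len(start) - 1]
--         else:
--             linked_list[i] = prev
--         prev = i
--     return linked_list
-- ===== SOURCE B (Python) =====
-- def singly_linked_list(start: list) -> dict:
--     # Divide and conquer: recursively split the index range in half, collect
--     # (element, circular predecessor) pairs from each half, and build the dict once.
--     def pairs(lo, hi):
--         if hi - lo <= 0: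
--             return []
--         if hi - lo == 1:
--             return [(start[lo], start[lo - 1])]
--         mid = (lo + hi) // 2
--         return pairs(lo, mid) + pairs(mid, hi)
--     return dict(pairs(0, len(start)))
-- ===== Notes on version B (the rewrite author's own statement) =====
-- stated objective: alternative
-- what changed: Replaces A's single forward pass with a running prev variable by a divide-and-conquer recursion that splits the index range in half, emits (element, circular predecessor) pairs per half using negative indexing for the wraparound, and builds the dict once from the concatenated pairs.
import Mathlib
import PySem

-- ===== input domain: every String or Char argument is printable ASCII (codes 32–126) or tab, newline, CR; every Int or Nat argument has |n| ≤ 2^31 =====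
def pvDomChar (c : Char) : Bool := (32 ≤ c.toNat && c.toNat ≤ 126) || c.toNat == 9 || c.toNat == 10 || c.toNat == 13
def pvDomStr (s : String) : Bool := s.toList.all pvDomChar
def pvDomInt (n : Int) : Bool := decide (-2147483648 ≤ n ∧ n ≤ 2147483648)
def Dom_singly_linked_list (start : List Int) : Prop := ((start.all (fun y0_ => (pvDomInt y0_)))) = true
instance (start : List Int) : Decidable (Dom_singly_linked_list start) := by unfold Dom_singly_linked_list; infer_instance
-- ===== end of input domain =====

-- ===== PORT A =====
-- One honest line: B replaces A's forward pass with a prev variable by a divide-and-conquer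
-- recursion over index halves that collects (element, circular predecessor) pairs; same values.
def singly_linked_list (start : List Int) : List (Int × Int) :=
  (start.foldl
    (fun (st : PySem.Dict Int Int × Option Int) i =>
      match st.2 with
      | none => (st.1.insert i (PySem.List.pyGetD start ((start.length : Int) - 1) 0), some i)
      | some p => (st.1.insert i p, some i))
    (PySem.Dict.empty, none)).1.items

-- ===== PORT B =====
-- pairs(lo, hi) from Source B: split the index range in half, recurse, concatenate.
def pvPairsB (start : List Int) (lo hi : Int) : List (Int × Int) :=
  if _h0 : hi - lo ≤ 0 then []
  else if _h1 : hi - lo = 1 then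
    [(PySem.List.pyGetD start lo 0, PySem.List.pyGetD start (lo - 1) 0)]
  else
    pvPairsB start lo (PySem.Int.floordiv (lo + hi) 2) ++
      pvPairsB start (PySem.Int.floordiv (lo + hi) 2) hi
termination_by (hi - lo).toNat
decreasing_by
  · have hm1 : lo + 1 ≤ PySem.Int.floordiv (lo + hi) 2 :=
      (PySem.Int.le_floordiv_iff_mul_le (by omega)).mpr (by omega)
    have hm2 : PySem.Int.floordiv (lo + hi) 2 < hi :=
      (PySem.Int.floordiv_lt_iff_lt_mul (by omega)).mpr (by omega)
    omega
  · have hm1 : lo + 1 ≤ PySem.Int.floordiv (lo + hi) 2 :=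
      (PySem.Int.le_floordiv_iff_mul_le (by omega)).mpr (by omega)
    have hm2 : PySem.Int.floordiv (lo + hi) 2 < hi :=
      (PySem.Int.floordiv_lt_iff_lt_mul (by omega)).mpr (by omega)
    omega

def singly_linked_list_alt (start : List Int) : List (Int × Int) :=
  (PySem.Dict.ofList (pvPairsB start 0 (start.length : Int))).items

-- ===== PRECONDITION & SPEC =====
def Spec_singly_linked_list (start : List Int) (out : List (Int × Int)) : Prop := out = singly_linked_list_alt start
instance (start : List Int) (out : List (Int × Int)) : Decidable (Spec_singly_linked_list start out) := by unfold Spec_singly_linked_list; infer_instance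

-- ===== CLAIM (what is proved, stated in full; the proofs are below) =====
def Claim_equal_singly_linked_list : Prop := ∀ (start : List Int), Dom_singly_linked_list start → Spec_singly_linked_list start (singly_linked_list start)

-- ===== LEMMAS AND PROOFS =====

-- A's loop after the first iteration (prev = some p) inserts each element keyed by its predecessor,
-- exactly the fold over the zip of xs with p :: xs.dropLast.
theorem pvLoop_some (start : List Int) :
    ∀ (xs : List Int) (d : PySem.Dict Int Int) (p : Int),
      (xs.foldl
        (fun (st : PySem.Dict Int Int × Option Int) i =>
          match st.2 with
          | none => (st.1.insert i (PySem.List.pyGetD start ((start.length : Int) - 1) 0), some i)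
          | some q => (st.1.insert i q, some i))
        (d, some p)).1
      = (xs.zip (p :: xs.dropLast)).foldl (fun d q => d.insert q.1 q.2) d := by
  intro xs
  induction xs with
  | nil => intro d p; rfl
  | cons y ys ih =>
    intro d p
    cases ys with
    | nil => rfl
    | cons z zs =>
      simpa [List.foldl_cons, List.zip] using ih (d.insert y p) y

-- Dict.ofList is definitionally the insert-fold from the empty dict.
theorem pvOfList_eq (l : List (Int × Int)) :
    PySem.Dict.ofList l = l.foldl (fun d q => d.insert q.1 q.2) PySem.Dict.empty := rfl

-- A equals the dict of (element, circular predecessor) pairs in list order.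
theorem pvA_eq_zip (start : List Int) (h : start ≠ []) :
    singly_linked_list start
      = (PySem.Dict.ofList
          (start.zip (PySem.List.pyGetD start (-1) 0 :: start.dropLast))).items := by
  cases start with
  | nil => exact absurd rfl h
  | cons x xs =>
    have hne : x :: xs ≠ [] := List.cons_ne_nil x xs
    have hlast : PySem.List.pyGetD (x :: xs) (((x :: xs).length : Int) - 1) 0
        = PySem.List.pyGetD (x :: xs) (-1) 0 := by
      rw [PySem.List.pyGetD_eq_getElem (x :: xs) 0 (by simp) (by simp),
          PySem.List.pyGetD_neg_one (x :: xs) 0 hne]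
      simp [List.getLast_eq_getElem]
    simp only [singly_linked_list, List.foldl_cons, pvOfList_eq]
    rw [pvLoop_some, hlast]
    cases xs with
    | nil => rfl
    | cons z zs => simp [List.zip]

-- B's recursion flattens to the map of the pair function over the index range.
theorem pvPairsB_eq (start : List Int) :
    ∀ (lo hi : Int),
      pvPairsB start lo hi
        = (PySem.List.pyRange lo hi).map
            (fun i => (PySem.List.pyGetD start i 0, PySem.List.pyGetD start (i - 1) 0)) := by
  intro lo hi
  fun_induction pvPairsB start lo hi with
  | case1 lo hi h0 =>
    have hr : PySem.List.pyRange lo hi = [] := by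
      simp [PySem.List.pyRange]; omega
    rw [hr]; rfl
  | case2 lo hi h0 h1 =>
    rw [PySem.List.pyRange_one_cons (by omega)]
    have hr : PySem.List.pyRange (lo + 1) hi = [] := by
      simp [PySem.List.pyRange]; omega
    rw [hr]; rfl
  | case3 lo hi h0 h1 ih1 ih2 =>
    have hm1 : lo + 1 ≤ PySem.Int.floordiv (lo + hi) 2 :=
      (PySem.Int.le_floordiv_iff_mul_le (by omega)).mpr (by omega)
    have hm2 : PySem.Int.floordiv (lo + hi) 2 < hi :=
      (PySem.Int.floordiv_lt_iff_lt_mul (by omega)).mpr (by omega)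
    rw [PySem.List.pyRange_one_append lo (PySem.Int.floordiv (lo + hi) 2) hi (by omega) (by omega),
        List.map_append, ih1, ih2]

-- The zip of the list with its circular-predecessor rotation is the same map over the range.
theorem pvZip_eq (start : List Int) (h : start ≠ []) :
    start.zip (PySem.List.pyGetD start (-1) 0 :: start.dropLast)
      = (PySem.List.pyRange 0 (start.length : Int)).map
          (fun i => (PySem.List.pyGetD start i 0, PySem.List.pyGetD start (i - 1) 0)) := by
  have hn : 0 < start.length := List.length_pos_iff.mpr h
  rw [PySem.List.pyRange_zero_natCast, List.map_map]
  apply List.ext_getElem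
  · simp [List.length_zip, List.length_dropLast]; omega
  · intro i h1 h2
    have hi : i < start.length := by simpa using h2
    rw [List.getElem_zip, List.getElem_map, List.getElem_range]
    have hfst : PySem.List.pyGetD start (i : Int) 0 = start[i] := by
      rw [PySem.List.pyGetD_eq_getElem start 0 (by omega) (by exact_mod_cast hi)]
      simp
    cases i with
    | zero =>
      have h01 : ((0 : Nat) : Int) - 1 = -1 := by norm_num
      simp only [Function.comp_apply, List.getElem_cons_zero, h01]
      rw [hfst]
    | succ j =>
      have hj1 : ((j + 1 : Nat) : Int) - 1 = (j : Int) := by push_cast; ring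
      have hsnd : PySem.List.pyGetD start (((j + 1 : Nat) : Int) - 1) 0 = start[j] := by
        rw [hj1, PySem.List.pyGetD_eq_getElem start 0 (by omega) (by exact_mod_cast (by omega : j < start.length))]
        simp
      simp only [Function.comp_apply, List.getElem_cons_succ, hfst, hsnd]
      rw [List.getElem_dropLast]

theorem singly_linked_list_eq (start : List Int) :
    singly_linked_list start = singly_linked_list_alt start := by
  cases hs : start with
  | nil =>
    rw [singly_linked_list_alt, pvPairsB_eq]
    have hr : PySem.List.pyRange 0 (([] : List Int).length : Int) = [] := by
      simp [PySem.List.pyRange]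
    rw [hr]
    rfl
  | cons x xs =>
    rw [← hs]
    have h : start ≠ [] := by rw [hs]; exact List.cons_ne_nil x xs
    rw [pvA_eq_zip start h, singly_linked_list_alt, pvPairsB_eq, pvZip_eq start h]

-- ===== VERDICT (by name: the statement is the Claim_ definition above) =====
theorem singly_linked_list_spec : Claim_equal_singly_linked_list := by
  intro start _
  unfold Spec_singly_linked_list
  exact singly_linked_list_eq start
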